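-- pv_equiv track=rewrite | github.com/yerim10044001/ProblemSolving | 프로그래머스/2/250136. ［PCCP 기출문제］ 2번 ／ 석유 시추/［PCCP 기출문제］ 2번 ／ 석유 시추.py | solution
-- ===== SOURCE A (Python) =====
-- from collections import deque
--
-- def solution(land):
--
--
--     dx = [-1, 0, 1, 0]
--     dy = [0, -1, 0, 1]
--
--     row_list = [0 for _ in range(len(land[0]))]
--     q = deque()
--
--     for i in range(len(land)):
--         for j in range(len(land[0])):
--
--             if land[i][j] == 1:
--                 row_check = set()
--                 oil = 0
--
--                 # dfs
--                 q.append([i, j])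
--                 row_check.add(j)
--                 oil += 1
--                 land[i][j] = 0
--
--                 while q:
--                     x, y = q.pop()
--
--                     for k in range(4):
--                         xx = x+dx[k]
--                         yy = y+dy[k]
--                         if 0 <= xx < len(land) and 0 <= yy < len(land[0]) and land[xx][yy]==1:
--                             q.append([xx, yy])
--                             row_check.add(yy)
--                             land[xx][yy] = 0
--                             oil += 1
--
--                 # oil
--                 for r in row_check:
--                     row_list[r] += oil
--
--
--     max_oil = max(row_list)
--
--     return max_oil
-- ===== SOURCE B (Python) =====
-- def solution(land):
--     # A 4-connected component's columns always form a contiguous interval, so each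
--     # component is summarized during the flood fill by just (size, min_col, max_col)
--     # and accumulated into a difference array; one prefix-sum pass gives the answer.
--     # The grid is scanned as a single flat loop. Mutates land (oil -> 0) like the original.
--     n, m = len(land), len(land[0])
--     diff = [0] * (m + 1)
--     for p in range(n * m):
--         i, j = divmod(p, m)
--         if land[i][j] == 1:
--             land[i][j] = 0
--             stack = [(i, j)]
--             size, lo, hi = 1, j, j
--             while stack:
--                 x, y = stack.pop()
--                 for xx, yy in ((x - 1, y), (x, y - 1), (x + 1, y), (x, y + 1)):
--                     if 0 <= xx < n and 0 <= yy < m and land[xx][yy] == 1: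
--                         land[xx][yy] = 0
--                         stack.append((xx, yy))
--                         size += 1
--                         lo = min(lo, yy)
--                         hi = max(hi, yy)
--             diff[lo] += size
--             diff[hi + 1] -= size
--     best = None
--     cur = 0
--     for j in range(m):
--         cur += diff[j]
--         if best is None or cur > best:
--             best = cur
--     return best
-- ===== Notes on version B (the rewrite author's own statement) =====
-- stated objective: alternative
-- what changed: A flood-fills and adds each component's oil to a per-column set of touched columns collected during the fill; B exploits that a 4-connected component's columns form a contiguous interval, so the fill tracks only (size, min_col, max_col), accumulates them into a difference array via a single flat divmod scan, and a final prefix-sum pass yields the maximum.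
-- outside the precondition, e.g. on solution([]): A raises IndexError, B raises IndexError; on solution([[]]): A raises ValueError, B returns None; on solution([[1, 1], [1]]): A raises IndexError, B raises IndexError
import Mathlib
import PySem

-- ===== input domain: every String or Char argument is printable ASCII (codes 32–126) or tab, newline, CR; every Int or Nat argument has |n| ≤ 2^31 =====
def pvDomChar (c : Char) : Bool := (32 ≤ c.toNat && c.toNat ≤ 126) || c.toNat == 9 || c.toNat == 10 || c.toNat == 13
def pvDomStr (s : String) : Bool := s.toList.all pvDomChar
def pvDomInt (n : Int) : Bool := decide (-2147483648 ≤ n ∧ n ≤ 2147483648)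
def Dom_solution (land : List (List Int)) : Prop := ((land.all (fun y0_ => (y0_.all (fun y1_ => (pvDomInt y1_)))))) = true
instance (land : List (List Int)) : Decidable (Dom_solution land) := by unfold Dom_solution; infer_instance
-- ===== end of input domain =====

-- B replaces A's per-component column SET by the pair (min_col, max_col) — a 4-connected component's
-- columns form a contiguous interval — accumulated into a difference array over a flat divmod scan.
-- The equivalence is about the RETURN value only: the Python A mutates `land` (oil cells to 0) and
-- the Python B performs the same mutation.

-- ===== PORT A =====
-- land[x][y] read / write; every call site guards 0 ≤ x < n and 0 ≤ y < m, where the defaults are never hit (exact there)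
def pvGet (g : List (List Int)) (x y : Int) : Int :=
  PySem.List.pyGetD (PySem.List.pyGetD g x []) y 0

def pvSet0 (g : List (List Int)) (x y : Int) : List (List Int) :=
  PySem.List.pySetD g x (PySem.List.pySetD (PySem.List.pyGetD g x []) y 0)

def pvDx : List Int := [-1, 0, 1, 0]
def pvDy : List Int := [0, -1, 0, 1]

-- one iteration k of A's `for k in range(4)` over the state (land, q, oil, row_check)
def pvStepA (n m x y : Int) (st : List (List Int) × List (Int × Int) × Int × PySem.Set Int) (k : Int) :
    List (List Int) × List (Int × Int) × Int × PySem.Set Int :=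
  let xx := x + PySem.List.pyGetD pvDx k 0
  let yy := y + PySem.List.pyGetD pvDy k 0
  if 0 ≤ xx ∧ xx < n ∧ 0 ≤ yy ∧ yy < m ∧ pvGet st.1 xx yy = 1 then
    (pvSet0 st.1 xx yy, (xx, yy) :: st.2.1, st.2.2.1 + 1, PySem.Set.add st.2.2.2 yy)
  else st

-- A's `while q:` loop; the stack is a list with push = cons, pop = head (deque append/pop on the right).
-- fuel is a totality guard only: each iteration pops one pushed cell and each cell is pushed at most once
-- (it is zeroed when pushed), so n*m+2 iterations always suffice and the loop ends with an empty stack.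
def pvWhileA (n m : Int) : Nat → List (List Int) → List (Int × Int) → Int → PySem.Set Int →
    List (List Int) × Int × PySem.Set Int
  | 0, g, _, oil, rc => (g, oil, rc)
  | _ + 1, g, [], oil, rc => (g, oil, rc)
  | fuel + 1, g, (x, y) :: rest, oil, rc =>
    let st := (PySem.List.pyRange 0 4 1).foldl (pvStepA n m x y) (g, rest, oil, rc)
    pvWhileA n m fuel st.1 st.2.1 st.2.2.1 st.2.2.2

-- A's body for one scan cell (i, j), acting on the state (land, row_list)
def pvCellA (n m : Int) (fuel : Nat) (i j : Int) (st : List (List Int) × List Int) :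
    List (List Int) × List Int :=
  if pvGet st.1 i j = 1 then
    let r := pvWhileA n m fuel (pvSet0 st.1 i j) [(i, j)] 1 (PySem.Set.add PySem.Set.empty j)
    -- `for r in row_check: row_list[r] += oil`: order-independent (sums commute), so Set insertion order is exact
    (r.1, r.2.2.foldl (fun rl c => PySem.List.pySetD rl c (PySem.List.pyGetD rl c 0 + r.2.1)) st.2)
  else st

def solution (land : List (List Int)) : Int :=
  let n : Int := land.length
  let m : Int := (PySem.List.pyGetD land 0 []).length   -- len(land[0]); Pre_ requires land ≠ []
  let fuel : Nat := (n * m).toNat + 2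
  let st := (PySem.List.pyRange 0 n 1).foldl
    (fun st i => (PySem.List.pyRange 0 m 1).foldl (fun st j => pvCellA n m fuel i j st) st)
    (land, List.replicate m.toNat 0)
  (PySem.List.max? st.2 (fun v => v)).getD 0   -- max(row_list); Pre_ requires a nonempty row_list

-- ===== PORT B =====
def pvNbrs (x y : Int) : List (Int × Int) := [(x - 1, y), (x, y - 1), (x + 1, y), (x, y + 1)]

-- one neighbour p of B's inner `for xx, yy in …` over the state (land, stack, size, lo, hi)
def pvStepB (n m : Int) (st : List (List Int) × List (Int × Int) × Int × Int × Int) (p : Int × Int) :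
    List (List Int) × List (Int × Int) × Int × Int × Int :=
  if 0 ≤ p.1 ∧ p.1 < n ∧ 0 ≤ p.2 ∧ p.2 < m ∧ pvGet st.1 p.1 p.2 = 1 then
    (pvSet0 st.1 p.1 p.2, p :: st.2.1, st.2.2.1 + 1, min st.2.2.2.1 p.2, max st.2.2.2.2 p.2)
  else st

-- B's `while stack:` loop (same fuel guard as A's — see the comment there)
def pvWhileB (n m : Int) : Nat → List (List Int) → List (Int × Int) → Int → Int → Int →
    List (List Int) × Int × Int × Int
  | 0, g, _, size, lo, hi => (g, size, lo, hi)
  | _ + 1, g, [], size, lo, hi => (g, size, lo, hi)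
  | fuel + 1, g, (x, y) :: rest, size, lo, hi =>
    let st := (pvNbrs x y).foldl (pvStepB n m) (g, rest, size, lo, hi)
    pvWhileB n m fuel st.1 st.2.1 st.2.2.1 st.2.2.2.1 st.2.2.2.2

-- `diff[lo] += size; diff[hi + 1] -= size`
def pvDiffAdd (diff : List Int) (size lo hi : Int) : List Int :=
  let d1 := PySem.List.pySetD diff lo (PySem.List.pyGetD diff lo 0 + size)
  PySem.List.pySetD d1 (hi + 1) (PySem.List.pyGetD d1 (hi + 1) 0 - size)

-- B's body for one scan cell (i, j), acting on the state (land, diff)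
def pvCellB (n m : Int) (fuel : Nat) (i j : Int) (st : List (List Int) × List Int) :
    List (List Int) × List Int :=
  if pvGet st.1 i j = 1 then
    let r := pvWhileB n m fuel (pvSet0 st.1 i j) [(i, j)] 1 j j
    (r.1, pvDiffAdd st.2 r.2.1 r.2.2.1 r.2.2.2)
  else st

-- one step j of B's closing `for j in range(m)` over the state (best, cur)
def pvBestStep (diff : List Int) (bc : Option Int × Int) (j : Int) : Option Int × Int :=
  let cur := bc.2 + PySem.List.pyGetD diff j 0
  (match bc.1 with
   | none => some cur
   | some b => if b < cur then some cur else some b, cur)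

def solution_alt (land : List (List Int)) : Int :=
  let n : Int := land.length
  let m : Int := (PySem.List.pyGetD land 0 []).length
  let fuel : Nat := (n * m).toNat + 2
  let st := (PySem.List.pyRange 0 (n * m) 1).foldl
    (fun st p =>
      -- i, j = divmod(p, m): the range is empty when m = 0, so divmod? is always some (default unreachable)
      let ij := (PySem.Int.divmod? p m).getD (0, 0)
      pvCellB n m fuel ij.1 ij.2 st)
    (land, List.replicate (m.toNat + 1) 0)
  -- best is none only when m = 0 (Python's best = None), excluded by Pre_
  (((PySem.List.pyRange 0 m 1).foldl (pvBestStep st.2) (none, 0)).1).getD 0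

-- ===== PRECONDITION & SPEC =====
-- Pre_ excludes exactly the inputs where the Python raises or returns no int: an empty grid
-- (IndexError on land[0]), an empty first row (A: ValueError from max([]); B returns None there,
-- not an int) and grids with a row shorter than the first one (IndexError during the scan).
def Pre_solution (land : List (List Int)) : Prop :=
  land ≠ [] ∧ 0 < (land.headD []).length ∧ ∀ row ∈ land, (land.headD []).length ≤ row.length
instance (land : List (List Int)) : Decidable (Pre_solution land) := by unfold Pre_solution; infer_instance

def pvWitness_solution : List (List Int) := [[1, 0, 1], [1, 1, 0]]

def Spec_solution (land : List (List Int)) (out : Int) : Prop := out = solution_alt land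
instance (land : List (List Int)) (out : Int) : Decidable (Spec_solution land out) := by unfold Spec_solution; infer_instance

-- ===== CLAIM (what is proved, stated in full; the proofs are below) =====
def Claim_equal_solution : Prop := ∀ (land : List (List Int)), Dom_solution land → Pre_solution land → Spec_solution land (solution land)

-- ===== LEMMAS AND PROOFS =====

-- A's neighbour step re-indexed by the absolute neighbour coordinate instead of k
def pvStepA' (n m : Int) (st : List (List Int) × List (Int × Int) × Int × PySem.Set Int) (p : Int × Int) :
    List (List Int) × List (Int × Int) × Int × PySem.Set Int :=
  if 0 ≤ p.1 ∧ p.1 < n ∧ 0 ≤ p.2 ∧ p.2 < m ∧ pvGet st.1 p.1 p.2 = 1 then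
    (pvSet0 st.1 p.1 p.2, p :: st.2.1, st.2.2.1 + 1, PySem.Set.add st.2.2.2 p.2)
  else st

lemma pv_bridgeA (n m x y : Int) (st : List (List Int) × List (Int × Int) × Int × PySem.Set Int) :
    (PySem.List.pyRange 0 4 1).foldl (pvStepA n m x y) st = (pvNbrs x y).foldl (pvStepA' n m) st := by
  have h4 : PySem.List.pyRange 0 4 1 = [0, 1, 2, 3] := by decide
  have e0 : PySem.List.pyGetD pvDx 0 0 = -1 := by decide
  have e1 : PySem.List.pyGetD pvDx 1 0 = 0 := by decide
  have e2 : PySem.List.pyGetD pvDx 2 0 = 1 := by decide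
  have e3 : PySem.List.pyGetD pvDx 3 0 = 0 := by decide
  have f0 : PySem.List.pyGetD pvDy 0 0 = 0 := by decide
  have f1 : PySem.List.pyGetD pvDy 1 0 = -1 := by decide
  have f2 : PySem.List.pyGetD pvDy 2 0 = 0 := by decide
  have f3 : PySem.List.pyGetD pvDy 3 0 = 1 := by decide
  rw [h4]
  simp only [pvNbrs, List.foldl_cons, List.foldl_nil, pvStepA, pvStepA', e0, e1, e2, e3,
    f0, f1, f2, f3, add_zero, sub_eq_add_neg]

-- the invariant tying A's column set rc to B's interval [lo, hi] through the fill
def pvInvB (m lo hi : Int) (rc : PySem.Set Int) (q : List (Int × Int)) : Prop :=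
  0 ≤ lo ∧ lo ≤ hi ∧ hi < m ∧ (∀ j : Int, j ∈ rc ↔ lo ≤ j ∧ j ≤ hi) ∧
  (∀ c ∈ q, lo ≤ c.2 ∧ c.2 ≤ hi) ∧ rc.Nodup

lemma pv_fold_rel (n m : Int) (ps : List (Int × Int)) :
    ∀ g q oil rc lo hi, pvInvB m lo hi rc q → (∀ p ∈ ps, lo - 1 ≤ p.2 ∧ p.2 ≤ hi + 1) →
      (ps.foldl (pvStepA' n m) (g, q, oil, rc)).1 = (ps.foldl (pvStepB n m) (g, q, oil, lo, hi)).1 ∧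
      (ps.foldl (pvStepA' n m) (g, q, oil, rc)).2.1 = (ps.foldl (pvStepB n m) (g, q, oil, lo, hi)).2.1 ∧
      (ps.foldl (pvStepA' n m) (g, q, oil, rc)).2.2.1 = (ps.foldl (pvStepB n m) (g, q, oil, lo, hi)).2.2.1 ∧
      pvInvB m (ps.foldl (pvStepB n m) (g, q, oil, lo, hi)).2.2.2.1
              (ps.foldl (pvStepB n m) (g, q, oil, lo, hi)).2.2.2.2
              (ps.foldl (pvStepA' n m) (g, q, oil, rc)).2.2.2
              (ps.foldl (pvStepB n m) (g, q, oil, lo, hi)).2.1 := by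
  induction ps with
  | nil => intro g q oil rc lo hi hinv hps; exact ⟨rfl, rfl, rfl, hinv⟩
  | cons p ps ih =>
    intro g q oil rc lo hi hinv hps
    obtain ⟨h0, hlh, hm, hmem, hq, hnd⟩ := hinv
    by_cases hg : 0 ≤ p.1 ∧ p.1 < n ∧ 0 ≤ p.2 ∧ p.2 < m ∧ pvGet g p.1 p.2 = 1
    · have hp := hps p List.mem_cons_self
      simp only [List.foldl_cons, pvStepA', pvStepB]
      rw [if_pos hg, if_pos hg]
      refine ih _ _ _ _ _ _ ?_ ?_
      · refine ⟨by omega, by omega, by omega, ?_, ?_, PySem.Set.nodup_add _ _ hnd⟩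
        · intro j
          rw [PySem.Set.mem_add]
          constructor
          · rintro (hj | rfl)
            · have := (hmem j).mp hj; omega
            · omega
          · intro hj
            by_cases hjle : lo ≤ j ∧ j ≤ hi
            · exact Or.inl ((hmem j).mpr hjle)
            · right; omega
        · intro c hc
          rcases List.mem_cons.mp hc with rfl | hc
          · omega
          · have := hq c hc; omega
      · intro p' hp'
        have := hps p' (List.mem_cons_of_mem _ hp')
        omega
    · simp only [List.foldl_cons, pvStepA', pvStepB]
      rw [if_neg hg, if_neg hg]
      exact ih _ _ _ _ _ _ ⟨h0, hlh, hm, hmem, hq, hnd⟩ (fun p' hp' => hps p' (List.mem_cons_of_mem _ hp'))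

lemma pv_while_rel (n m : Int) :
    ∀ (fuel : Nat) g q oil rc lo hi, pvInvB m lo hi rc q →
      (pvWhileA n m fuel g q oil rc).1 = (pvWhileB n m fuel g q oil lo hi).1 ∧
      (pvWhileA n m fuel g q oil rc).2.1 = (pvWhileB n m fuel g q oil lo hi).2.1 ∧
      pvInvB m (pvWhileB n m fuel g q oil lo hi).2.2.1 (pvWhileB n m fuel g q oil lo hi).2.2.2
              (pvWhileA n m fuel g q oil rc).2.2 [] := by
  intro fuel
  induction fuel with
  | zero =>
    intro g q oil rc lo hi hinv
    obtain ⟨h0, hlh, hm, hmem, _, hnd⟩ := hinv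
    exact ⟨rfl, rfl, h0, hlh, hm, hmem, by simp, hnd⟩
  | succ fuel ih =>
    intro g q oil rc lo hi hinv
    match q with
    | [] =>
      obtain ⟨h0, hlh, hm, hmem, _, hnd⟩ := hinv
      exact ⟨rfl, rfl, h0, hlh, hm, hmem, by simp, hnd⟩
    | (x, y) :: rest =>
      obtain ⟨h0, hlh, hm, hmem, hq, hnd⟩ := hinv
      have hy := hq (x, y) List.mem_cons_self
      simp only [pvWhileA, pvWhileB]
      rw [pv_bridgeA]
      have hps : ∀ p ∈ pvNbrs x y, lo - 1 ≤ p.2 ∧ p.2 ≤ hi + 1 := by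
        intro p hp
        simp only [pvNbrs, List.mem_cons, List.not_mem_nil, or_false] at hp
        rcases hp with rfl | rfl | rfl | rfl <;> simp only [] <;> omega
      obtain ⟨e1, e2, e3, hinv'⟩ := pv_fold_rel n m (pvNbrs x y) g rest oil rc lo hi
        ⟨h0, hlh, hm, hmem, fun c hc => hq c (List.mem_cons_of_mem _ hc), hnd⟩ hps
      rw [e1, e2, e3]
      exact ih _ _ _ _ _ _ hinv'

-- `row_list[r] += oil` over a Nodup in-range list of columns, characterised pointwise
lemma pv_addRows (m oil : Int) (rs : List Int) (hnd : rs.Nodup) (hr : ∀ r ∈ rs, 0 ≤ r ∧ r < m) :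
    ∀ rl : List Int, rl.length = m.toNat →
      (rs.foldl (fun rl c => PySem.List.pySetD rl c (PySem.List.pyGetD rl c 0 + oil)) rl).length = m.toNat ∧
      ∀ j : Int, 0 ≤ j → j < m →
        PySem.List.pyGetD (rs.foldl (fun rl c => PySem.List.pySetD rl c (PySem.List.pyGetD rl c 0 + oil)) rl) j 0 =
          PySem.List.pyGetD rl j 0 + (if j ∈ rs then oil else 0) := by
  induction rs with
  | nil => intro rl hlen; simp [hlen]
  | cons r rs ih =>
    intro rl hlen
    have hr0 := hr r (List.mem_cons_self)
    have hnotmem : r ∉ rs := (List.nodup_cons.mp hnd).1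
    have hnd' : rs.Nodup := (List.nodup_cons.mp hnd).2
    have hr' : ∀ x ∈ rs, 0 ≤ x ∧ x < m := fun x hx => hr x (List.mem_cons_of_mem _ hx)
    set v := PySem.List.pyGetD rl r 0 + oil with hv
    have hset : PySem.List.pySetD rl r v = rl.set r.toNat v :=
      PySem.List.pySetD_of_nonneg rl v hr0.1
    have hlen' : (PySem.List.pySetD rl r v).length = m.toNat := by
      rw [hset, List.length_set, hlen]
    have hget : ∀ j : Int, 0 ≤ j → j < m →
        PySem.List.pyGetD (PySem.List.pySetD rl r v) j 0 =
          if j = r then PySem.List.pyGetD rl r 0 + oil else PySem.List.pyGetD rl j 0 := by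
      intro j hj0 hjm
      have hjlen : j < ((PySem.List.pySetD rl r v).length : Int) := by
        rw [hlen']; omega
      have hjlen2 : j < ((rl.length : Nat) : Int) := by rw [hlen]; omega
      rw [PySem.List.pyGetD_eq_getElem _ _ hj0 hjlen, PySem.List.pyGetD_eq_getElem _ _ hj0 hjlen2]
      simp only [hset, List.getElem_set]
      by_cases hjr : j = r
      · subst hjr; simp [hv]
      · have hne : ¬ (r.toNat = j.toNat) := by omega
        simp [hne, hjr]
    obtain ⟨ihlen, ihget⟩ := ih hnd' hr' (PySem.List.pySetD rl r v) hlen'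
    constructor
    · simpa using ihlen
    · intro j hj0 hjm
      simp only [List.foldl_cons]
      rw [ihget j hj0 hjm, hget j hj0 hjm]
      by_cases hjr : j = r
      · subst hjr
        simp [hnotmem]
      · simp [hjr, List.mem_cons]

-- sum of the first t entries of the difference array
def pvSum (diff : List Int) (t : Nat) : Int :=
  ((List.range t).map (fun k => diff.getD k 0)).sum

lemma pv_pyGetD_toNat (xs : List Int) (i : Int) (d : Int) (h : 0 ≤ i) :
    PySem.List.pyGetD xs i d = xs.getD i.toNat d := by
  obtain ⟨n, rfl⟩ := Int.eq_ofNat_of_zero_le h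
  simp

lemma pv_sum_set (xs : List Int) (i : Nat) (v : Int) (hi : i < xs.length) :
    ∀ t : Nat, pvSum (xs.set i v) t = pvSum xs t + (if i < t then v - xs.getD i 0 else 0) := by
  intro t
  induction t with
  | zero => simp [pvSum]
  | succ t ih =>
    simp only [pvSum, List.range_succ, List.map_append, List.sum_append, List.map_cons,
      List.map_nil, List.sum_cons, List.sum_nil] at *
    rw [ih]
    by_cases hit : i = t
    · subst hit
      have h2 : (xs.set i v).getD i 0 = v := by
        simp [List.getD, hi]
      rw [h2]
      simp
    · have h2 : (xs.set i v).getD t 0 = xs.getD t 0 := by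
        simp [List.getD, List.getElem?_set_ne hit]
      rw [h2]
      by_cases hlt : i < t
      · simp [hlt, Nat.lt_succ_of_lt hlt]; ring
      · have h3 : ¬ i < t + 1 := by omega
        simp [hlt, h3]

lemma pv_diffAdd_sum (diff : List Int) (size lo hi m : Int)
    (h0 : 0 ≤ lo) (hlh : lo ≤ hi) (hm : hi < m) (hlen : diff.length = m.toNat + 1) :
    (pvDiffAdd diff size lo hi).length = m.toNat + 1 ∧
    ∀ t : Nat, pvSum (pvDiffAdd diff size lo hi) t =
      pvSum diff t + (if lo.toNat < t then size else 0) + (if (hi + 1).toNat < t then -size else 0) := by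
  have hlo : lo.toNat < diff.length := by omega
  have hne : (hi + 1).toNat ≠ lo.toNat := by omega
  simp only [pvDiffAdd]
  rw [PySem.List.pySetD_of_nonneg _ _ h0, pv_pyGetD_toNat diff lo 0 h0]
  set d1 := diff.set lo.toNat (diff.getD lo.toNat 0 + size) with hd1
  rw [PySem.List.pySetD_of_nonneg _ _ (by omega : (0:Int) ≤ hi + 1),
      pv_pyGetD_toNat d1 (hi + 1) 0 (by omega)]
  have hgd1 : d1.getD (hi + 1).toNat 0 = diff.getD (hi + 1).toNat 0 := by
    simp [hd1, List.getD, List.getElem?_set_ne hne.symm]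
  constructor
  · simp [hd1, hlen]
  · intro t
    rw [pv_sum_set d1 (hi + 1).toNat _ (by simp [hd1]; omega) t,
        pv_sum_set diff lo.toNat _ hlo t, hgd1]
    by_cases c1 : lo.toNat < t <;> by_cases c2 : (hi + 1).toNat < t <;>
      simp [c1, c2]

-- the relation the outer scan maintains between A's (land, row_list) and B's (land, diff)
def pvRel (m : Int) (a : List (List Int) × List Int) (b : List (List Int) × List Int) : Prop :=
  a.1 = b.1 ∧ a.2.length = m.toNat ∧ b.2.length = m.toNat + 1 ∧
  ∀ j : Int, 0 ≤ j → j < m → PySem.List.pyGetD a.2 j 0 = pvSum b.2 (j.toNat + 1)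

lemma pv_cell_rel (n m : Int) (fuel : Nat) (i j : Int) (hj0 : 0 ≤ j) (hjm : j < m)
    (a : List (List Int) × List Int) (b : List (List Int) × List Int)
    (h : pvRel m a b) : pvRel m (pvCellA n m fuel i j a) (pvCellB n m fuel i j b) := by
  obtain ⟨hg, hlenA, hlenB, hget⟩ := h
  by_cases hc : pvGet a.1 i j = 1
  · have hcb : pvGet b.1 i j = 1 := hg ▸ hc
    simp only [pvCellA, pvCellB]
    rw [if_pos hc, if_pos hcb, hg]
    have hinv0 : pvInvB m j j (PySem.Set.add PySem.Set.empty j) [(i, j)] := by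
      refine ⟨hj0, le_refl j, hjm, ?_, ?_, PySem.Set.nodup_add _ _ (by simp [PySem.Set.empty])⟩
      · intro j'
        rw [PySem.Set.mem_add]
        simp only [PySem.Set.empty, List.not_mem_nil, false_or]
        omega
      · intro c hc'
        simp only [List.mem_cons, List.not_mem_nil, or_false] at hc'
        subst hc'
        omega
    obtain ⟨e1, e2, hinv⟩ :=
      pv_while_rel n m fuel (pvSet0 b.1 i j) [(i, j)] 1 (PySem.Set.add PySem.Set.empty j) j j hinv0
    obtain ⟨hlo0, hlohi, hhim, hmem, _, hnd⟩ := hinv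
    set w := pvWhileB n m fuel (pvSet0 b.1 i j) [(i, j)] 1 j j with hw
    set r := pvWhileA n m fuel (pvSet0 b.1 i j) [(i, j)] 1 (PySem.Set.add PySem.Set.empty j) with hr
    obtain ⟨hlen', hget'⟩ := pv_addRows m r.2.1 r.2.2 hnd
      (fun c hcm => by have := (hmem c).mp hcm; omega) a.2 hlenA
    obtain ⟨hlenD, hsumD⟩ := pv_diffAdd_sum b.2 w.2.1 w.2.2.1 w.2.2.2 m hlo0 hlohi hhim hlenB
    refine ⟨e1, hlen', hlenD, ?_⟩
    intro j' hj0' hjm'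
    rw [hget' j' hj0' hjm', hget j' hj0' hjm', hsumD (j'.toNat + 1), e2]
    have hmem' : j' ∈ r.2.2 ↔ w.2.2.1 ≤ j' ∧ j' ≤ w.2.2.2 := hmem j'
    by_cases hin : w.2.2.1 ≤ j' ∧ j' ≤ w.2.2.2
    · have c1 : w.2.2.1.toNat < j'.toNat + 1 := by omega
      have c2 : ¬ (w.2.2.2 + 1).toNat < j'.toNat + 1 := by omega
      rw [if_pos (hmem'.mpr hin), if_pos c1, if_neg c2]
      ring
    · have hnin : j' ∉ r.2.2 := fun hx => hin (hmem'.mp hx)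
      rw [if_neg hnin]
      by_cases c1 : w.2.2.1.toNat < j'.toNat + 1
      · have c2 : (w.2.2.2 + 1).toNat < j'.toNat + 1 := by omega
        rw [if_pos c1, if_pos c2]
        ring
      · have c2 : ¬ (w.2.2.2 + 1).toNat < j'.toNat + 1 := by omega
        rw [if_neg c1, if_neg c2]
        ring
  · have hcb : ¬ pvGet b.1 i j = 1 := hg ▸ hc
    simp only [pvCellA, pvCellB]
    rw [if_neg hc, if_neg hcb]
    exact ⟨hg, hlenA, hlenB, hget⟩

-- flattening: the divmod scan over range(n*m) is the nested row/column scan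
lemma pv_flat {S : Type} (m : Int) (hm : 0 < m) (f : Int → Int → S → S) :
    ∀ (N : Nat) (s : S),
      (PySem.List.pyRange 0 ((N : Int) * m) 1).foldl
        (fun st p => f ((PySem.Int.divmod? p m).getD (0, 0)).1 ((PySem.Int.divmod? p m).getD (0, 0)).2 st) s
      = (PySem.List.pyRange 0 (N : Int) 1).foldl
          (fun st i => (PySem.List.pyRange 0 m 1).foldl (fun st j => f i j st) st) s := by
  intro N
  induction N with
  | zero =>
    intro s
    have hz : ((0:Nat):Int) = 0 := by norm_num
    rw [hz, zero_mul, PySem.List.pyRange_one_eq_nil (le_refl 0)]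
    rfl
  | succ N ih =>
    intro s
    rw [show ((N+1 : Nat) : Int) = (N:Int) + 1 by push_cast; ring]
    have hNm : (0:Int) ≤ (N:Int) * m := by positivity
    rw [PySem.List.pyRange_one_append 0 ((N:Int)*m) (((N:Int)+1)*m) hNm (by nlinarith),
        List.foldl_append,
        PySem.List.pyRange_one_succ_right (by positivity : (0:Int) ≤ (N:Int)),
        List.foldl_append, ih]
    simp only [List.foldl_cons, List.foldl_nil]
    generalize ((PySem.List.pyRange 0 (N:Int) 1).foldl
      (fun st i => (PySem.List.pyRange 0 m 1).foldl (fun st j => f i j st) st) s) = s'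
    rw [PySem.List.pyRange_one ((N:Int)*m) (((N:Int)+1)*m), PySem.List.pyRange_one 0 m,
        show (((N:Int)+1)*m - (N:Int)*m) = m by ring, sub_zero,
        List.foldl_map, List.foldl_map]
    apply PySem.List.foldl_congr_mem'
    intro k hk acc
    have hkm : (k:Int) < m := by
      have := List.mem_range.mp hk
      omega
    have h1 : PySem.Int.floordiv ((N:Int) * m + k) m = (N:Int) := by
      rw [PySem.Int.floordiv_eq_iff_of_pos hm]
      constructor
      · nlinarith [Int.natCast_nonneg k]
      · nlinarith
    have h2 : PySem.Int.mod ((N:Int) * m + k) m = (k:Int) := by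
      have h3 := PySem.Int.floordiv_mul_add_mod ((N:Int) * m + k) m
      rw [h1] at h3; linarith
    have hfd : ((N:Int) * m + k).fdiv m = (N:Int) := h1
    have hfm : ((N:Int) * m + k).fmod m = (k:Int) := h2
    have hm0 : ¬ m = 0 := by omega
    simp [PySem.Int.divmod?, hfd, hfm, hm0]

-- B's closing loop: running best over the running prefix sums
def pvOptMax (b : Option Int) (v : Int) : Option Int :=
  match b with
  | none => some v
  | some x => if x < v then some v else some x

def pvCurs (diff : List Int) : Int → List Int → List Int
  | _, [] => []
  | c, j :: js => (c + PySem.List.pyGetD diff j 0) :: pvCurs diff (c + PySem.List.pyGetD diff j 0) js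

lemma pv_bestloop (diff : List Int) :
    ∀ (js : List Int) (b : Option Int) (c : Int),
      (js.foldl (pvBestStep diff) (b, c)).1 = (pvCurs diff c js).foldl pvOptMax b := by
  intro js
  induction js with
  | nil => intro b c; rfl
  | cons j js ih =>
    intro b c
    simp only [List.foldl_cons, pvCurs]
    have h1 : pvBestStep diff (b, c) j =
        (pvOptMax b (c + PySem.List.pyGetD diff j 0), c + PySem.List.pyGetD diff j 0) := by
      cases b <;> rfl
    rw [h1]
    exact ih _ _

lemma pv_curs_range (diff : List Int) (m : Int) :
    ∀ (t : Nat) (a : Int), 0 ≤ a → a + t = m →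
      pvCurs diff (pvSum diff a.toNat) (PySem.List.pyRange a m 1)
        = (PySem.List.pyRange a m 1).map (fun j => pvSum diff (j.toNat + 1)) := by
  intro t
  induction t with
  | zero =>
    intro a ha0 ham
    rw [PySem.List.pyRange_one_eq_nil (by omega)]
    rfl
  | succ t ih =>
    intro a ha0 ham
    have hab : a < m := by omega
    rw [PySem.List.pyRange_one_cons hab]
    simp only [pvCurs, List.map_cons]
    have hs : pvSum diff a.toNat + PySem.List.pyGetD diff a 0 = pvSum diff (a.toNat + 1) := by
      rw [pv_pyGetD_toNat diff a 0 ha0]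
      simp [pvSum, List.range_succ]
    rw [hs]
    have h1 : (a + 1).toNat = a.toNat + 1 := by omega
    have h2 := ih (a + 1) (by omega) (by omega)
    rw [h1] at h2
    rw [h2]

lemma pv_foldmax (rest : List Int) : ∀ (b : Int),
    rest.foldl pvOptMax (some b) = some (rest.foldl max b) := by
  induction rest with
  | nil => intro b; rfl
  | cons x t ih =>
    intro b
    have h1 : pvOptMax (some b) x = some (max b x) := by
      simp only [pvOptMax]
      split_ifs with h
      · simp [max_eq_right (le_of_lt h)]
      · simp [max_eq_left (not_lt.mp h)]
    simp only [List.foldl_cons, h1]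
    exact ih (max b x)

lemma pv_foldCells_rel (n m : Int) (fuel : Nat) (i : Int) (js : List Int)
    (hjs : ∀ j ∈ js, 0 ≤ j ∧ j < m) :
    ∀ a b, pvRel m a b →
      pvRel m (js.foldl (fun st j => pvCellA n m fuel i j st) a)
              (js.foldl (fun st j => pvCellB n m fuel i j st) b) := by
  induction js with
  | nil => intro a b h; simpa using h
  | cons j js ih =>
    intro a b h
    simp only [List.foldl_cons]
    have hj := hjs j (List.mem_cons_self)
    exact ih (fun x hx => hjs x (List.mem_cons_of_mem _ hx)) _ _
      (pv_cell_rel n m fuel i j hj.1 hj.2 a b h)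

lemma pv_foldRows_rel (n m : Int) (fuel : Nat) (is : List Int) :
    ∀ a b, pvRel m a b →
      pvRel m (is.foldl (fun st i => (PySem.List.pyRange 0 m 1).foldl (fun st j => pvCellA n m fuel i j st) st) a)
              (is.foldl (fun st i => (PySem.List.pyRange 0 m 1).foldl (fun st j => pvCellB n m fuel i j st) st) b) := by
  induction is with
  | nil => intro a b h; simpa using h
  | cons i is ih =>
    intro a b h
    simp only [List.foldl_cons]
    refine ih _ _ ?_
    refine pv_foldCells_rel n m fuel i (PySem.List.pyRange 0 m 1) ?_ a b h
    intro j hj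
    have hj2 := PySem.List.mem_pyRange_one.mp hj
    exact ⟨hj2.1, hj2.2⟩

lemma pv_main (land : List (List Int)) (hpre : Pre_solution land) :
    solution land = solution_alt land := by
  obtain ⟨hne, hrow, -⟩ := hpre
  simp only [solution, solution_alt]
  set n : Int := (land.length : Int) with hn
  set m : Int := ((PySem.List.pyGetD land 0 []).length : Int) with hm
  have hm0 : 0 < m := by
    match land, hne with
    | r :: _, _ =>
      rw [hm]
      simp only [PySem.List.pyGetD_zero_cons]
      simp only [List.headD_cons] at hrow
      omega
  set fuel : Nat := (n * m).toNat + 2 with hfuel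
  -- flat divmod scan = nested row/column scan
  rw [pv_flat m hm0 (fun i j st => pvCellB n m fuel i j st) land.length]
  -- the outer scans preserve pvRel
  have hinit : pvRel m (land, List.replicate m.toNat 0) (land, List.replicate (m.toNat + 1) 0) := by
    refine ⟨rfl, by simp, by simp, ?_⟩
    intro j hj0 hjm
    rw [pv_pyGetD_toNat _ _ _ hj0]
    have h1 : ∀ (N k : Nat), (List.replicate N (0:Int)).getD k 0 = 0 := by
      intro N k
      simp [List.getD, List.getElem?_replicate]
      split_ifs <;> rfl
    rw [h1]
    simp only [pvSum]
    have h2 : ∀ k ∈ List.range (j.toNat + 1), (List.replicate (m.toNat + 1) (0:Int)).getD k 0 = 0 := by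
      intro k hk
      exact h1 _ _
    rw [List.map_congr_left h2]
    simp
  have hrel := pv_foldRows_rel n m fuel (PySem.List.pyRange 0 n 1) _ _ hinit
  set stA := (PySem.List.pyRange 0 n 1).foldl
    (fun st i => (PySem.List.pyRange 0 m 1).foldl (fun st j => pvCellA n m fuel i j st) st)
    (land, List.replicate m.toNat 0) with hstA
  set stB := (PySem.List.pyRange 0 n 1).foldl
    (fun st i => (PySem.List.pyRange 0 m 1).foldl (fun st j => pvCellB n m fuel i j st) st)
    (land, List.replicate (m.toNat + 1) 0) with hstB
  obtain ⟨-, hlenA, -, hget⟩ := hrel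
  -- A's row_list is exactly the prefix-sum sequence of B's difference array
  have hlists : stA.2 = (PySem.List.pyRange 0 m 1).map (fun j => pvSum stB.2 (j.toNat + 1)) := by
    apply List.ext_getElem
    · rw [hlenA]
      simp [PySem.List.length_pyRange_one]
    · intro k hk1 hk2
      have hkm : k < m.toNat := by rwa [hlenA] at hk1
      have hgk : PySem.List.pyGetD stA.2 (k : Int) 0 = stA.2[k] := by
        rw [PySem.List.pyGetD_eq_getElem _ _ (Int.natCast_nonneg _) (by exact_mod_cast hk1)]
        simp
      rw [← hgk] at *
      rw [hget (k : Int) (Int.natCast_nonneg _) (by omega)]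
      rw [List.getElem_map, PySem.List.getElem_pyRange_one]
      norm_num
  -- B's closing best/cur loop is the running max of that same sequence
  rw [pv_bestloop stB.2 (PySem.List.pyRange 0 m 1) none 0]
  have hcurs : pvCurs stB.2 0 (PySem.List.pyRange 0 m 1)
      = (PySem.List.pyRange 0 m 1).map (fun j => pvSum stB.2 (j.toNat + 1)) := by
    have := pv_curs_range stB.2 m m.toNat 0 (le_refl 0) (by omega)
    simpa [pvSum] using this
  rw [hcurs, ← hlists]
  obtain ⟨v, rest, hcons⟩ : ∃ v rest, stA.2 = v :: rest := by
    match h : stA.2 with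
    | [] => rw [h] at hlenA; simp at hlenA; omega
    | v :: rest => exact ⟨v, rest, rfl⟩
  rw [hcons, PySem.List.max?_id_cons]
  simp only [List.foldl_cons]
  rw [show pvOptMax none v = some v from rfl, pv_foldmax rest v]

-- ===== VERDICT (by name: the statement is the Claim_ definition above) =====
theorem solution_spec : Claim_equal_solution := by
  intro land _ hpre
  unfold Spec_solution
  exact pv_main land hpre
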